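-- pv_equiv track=rewrite | github.com/LouisTaojx/project2 | Utility.py | generate_remove_improved
-- ===== SOURCE A (Python) =====
-- def check_for_mills(i, l):
--     t = l[i]
--     switcher = {
--         0: l[2] == t and l[4] == t,
--         1: (l[3] == t and l[5] == t) or (l[8] == t and l[17] == t),
--         2: l[0] == t and l[4] == t,
--         3: (l[1] == t and l[5] == t) or (l[7] == t and l[14] == t),
--         4: l[0] == t and l[2] == t,
--         5: (l[1] == t and l[3] == t) or (l[6] == t and l[11] == t),
--         6: (l[5] == t and l[11] == t) or (l[7] == t and l[8] == t),
--         7: (l[6] == t and l[8] == t) or (l[3] == t and l[14] == t),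
--         8: (l[6] == t and l[7] == t) or (l[1] == t and l[17] == t),
--         9: (l[10] == t and l[11] == t) or (l[12] == t and l[15] == t),
--         10: (l[9] == t and l[11] == t) or (l[13] == t and l[16] == t),
--         11: (l[9] == t and l[10] == t) or (l[14] == t and l[17] == t) or (l[5] == t and l[6] == t),
--         12: (l[13] == t and l[14] == t) or (l[9] == t and l[15] == t),
--         13: (l[12] == t and l[14] == t) or (l[10] == t and l[16] == t),
--         14: (l[12] == t and l[13] == t) or (l[11] == t and l[17] == t) or (l[3] == t and l[7] == t),
--         15: (l[16] == t and l[17] == t) or (l[9] == t and l[12] == t),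
--         16: (l[15] == t and l[17] == t) or (l[10] == t and l[13] == t),
--         17: (l[15] == t and l[16] == t) or (l[11] == t and l[14] == t) or (l[1] == t and l[8] == t),
--     }
--     return switcher.get(i, False)
--
-- def generate_remove_improved(board, index, transposition_table):
--     """
--     Removes 'B' pieces from the board that are not part of a mill.
--
--     Parameters:
--     board (list): The current state of the board.
--     index (int): The index where the mill was created.
--     transposition_table (dict): A dictionary to store previously computed board states.
--
--     Returns:
--     list: Updated list with new board states.
--     """
--     board_tuple = tuple(board)
--     if board_tuple in transposition_table:
--         return transposition_table[board_tuple]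
--
--     count = 0
--     new_boards = []
--     for i, piece in enumerate(board):
--         if piece == 'B':
--             if not check_for_mills(i, board):
--                 new_board = board.copy()
--                 new_board[i] = 'x'
--                 new_boards.append(new_board)
--                 count += 1
--
--     if count == 0:
--         new_boards.append(board.copy())
--
--     transposition_table[board_tuple] = new_boards
--     return new_boards
-- ===== SOURCE B (Python) =====
-- # B: two staged passes instead of A's per-piece mill test: first compute, from a
-- # data-driven MILLS table, the set of cells protected by a completed mill (one
-- # pass over the 12 mills, skipping mills that do not fit on the board); then one
-- # pass over the board collecting a copy-with-'x' for each unprotected 'B'.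
-- # Like A it memoizes the result into transposition_table (same observable
-- # mutation); the equivalence proved is about the return value.
--
-- MILLS = [(0, 2, 4), (1, 3, 5), (1, 8, 17), (3, 7, 14), (5, 6, 11), (6, 7, 8),
--          (9, 10, 11), (9, 12, 15), (10, 13, 16), (11, 14, 17), (12, 13, 14),
--          (15, 16, 17)]
--
-- def generate_remove_improved(board, index, transposition_table):
--     key = tuple(board)
--     if key in transposition_table:
--         return transposition_table[key]
--     n = len(board)
--     protected = set()
--     for a, b, c in MILLS:
--         if c < n and board[a] == board[b] == board[c]:
--             protected.update((a, b, c))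
--     new_boards = []
--     for i in range(n):
--         if board[i] == 'B' and i not in protected:
--             nb = board.copy()
--             nb[i] = 'x'
--             new_boards.append(nb)
--     if not new_boards:
--         new_boards.append(board.copy())
--     transposition_table[key] = new_boards
--     return new_boards
-- ===== Notes on version B (the rewrite author's own statement) =====
-- stated objective: alternative
-- what changed: A rebuilds an 18-entry hard-coded boolean dict of mill conditions for every 'B' piece; B instead makes two staged passes: one pass over a 12-entry MILLS triple table computing the set of mill-protected cells once, then one pass over the board removing each unprotected 'B'. Pre_ excludes uncached boards shorter than 18 containing 'B': A raises IndexError on all of them except some 17-cell boards where and-short-circuiting avoids the bad access (there A agrees with B, but A's raising is value-dependent, so the whole shape is excluded).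
import Mathlib
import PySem

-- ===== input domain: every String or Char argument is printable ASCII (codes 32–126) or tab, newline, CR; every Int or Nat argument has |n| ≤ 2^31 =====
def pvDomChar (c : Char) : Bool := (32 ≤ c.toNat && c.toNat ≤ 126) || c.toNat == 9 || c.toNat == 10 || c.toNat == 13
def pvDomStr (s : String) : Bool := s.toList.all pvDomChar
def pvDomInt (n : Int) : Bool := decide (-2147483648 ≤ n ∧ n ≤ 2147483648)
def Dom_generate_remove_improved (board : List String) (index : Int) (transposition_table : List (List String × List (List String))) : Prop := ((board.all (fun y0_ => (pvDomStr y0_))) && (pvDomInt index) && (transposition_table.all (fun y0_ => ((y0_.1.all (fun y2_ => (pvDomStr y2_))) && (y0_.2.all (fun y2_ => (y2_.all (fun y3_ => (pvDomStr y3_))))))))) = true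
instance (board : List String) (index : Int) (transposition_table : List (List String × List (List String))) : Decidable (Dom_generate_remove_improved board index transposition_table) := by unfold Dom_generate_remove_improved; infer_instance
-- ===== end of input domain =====

-- B replaces A's per-piece mill test (an 18-entry boolean dict rebuilt for every 'B' piece) by two
-- staged passes: one pass over a 12-entry mill table computing the set of mill-protected cells once,
-- then one pass over the board (objective: alternative). Both the Python A and the Python B also
-- write the computed list into transposition_table (same mutation); the theorem is about the return
-- value.

-- ===== PORT A =====

-- l[k] as pyGetD: inside Pre_ every access A performs is in range, so the default "" is never used
-- (in Python an out-of-range access raises IndexError; those inputs are outside Pre_).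
def pvG (l : List String) (k : Int) : String := PySem.List.pyGetD l k ""

def check_for_mills (i : Int) (l : List String) : Bool :=
  let t := pvG l i
  let switcher : PySem.Dict Int Bool := PySem.Dict.mk [
    (0, pvG l 2 == t && pvG l 4 == t),
    (1, (pvG l 3 == t && pvG l 5 == t) || (pvG l 8 == t && pvG l 17 == t)),
    (2, pvG l 0 == t && pvG l 4 == t),
    (3, (pvG l 1 == t && pvG l 5 == t) || (pvG l 7 == t && pvG l 14 == t)),
    (4, pvG l 0 == t && pvG l 2 == t),
    (5, (pvG l 1 == t && pvG l 3 == t) || (pvG l 6 == t && pvG l 11 == t)),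
    (6, (pvG l 5 == t && pvG l 11 == t) || (pvG l 7 == t && pvG l 8 == t)),
    (7, (pvG l 6 == t && pvG l 8 == t) || (pvG l 3 == t && pvG l 14 == t)),
    (8, (pvG l 6 == t && pvG l 7 == t) || (pvG l 1 == t && pvG l 17 == t)),
    (9, (pvG l 10 == t && pvG l 11 == t) || (pvG l 12 == t && pvG l 15 == t)),
    (10, (pvG l 9 == t && pvG l 11 == t) || (pvG l 13 == t && pvG l 16 == t)),
    (11, (pvG l 9 == t && pvG l 10 == t) || (pvG l 14 == t && pvG l 17 == t) || (pvG l 5 == t && pvG l 6 == t)),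
    (12, (pvG l 13 == t && pvG l 14 == t) || (pvG l 9 == t && pvG l 15 == t)),
    (13, (pvG l 12 == t && pvG l 14 == t) || (pvG l 10 == t && pvG l 16 == t)),
    (14, (pvG l 12 == t && pvG l 13 == t) || (pvG l 11 == t && pvG l 17 == t) || (pvG l 3 == t && pvG l 7 == t)),
    (15, (pvG l 16 == t && pvG l 17 == t) || (pvG l 9 == t && pvG l 12 == t)),
    (16, (pvG l 15 == t && pvG l 17 == t) || (pvG l 10 == t && pvG l 13 == t)),
    (17, (pvG l 15 == t && pvG l 16 == t) || (pvG l 11 == t && pvG l 14 == t) || (pvG l 1 == t && pvG l 8 == t))]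
  switcher.getD i false

def generate_remove_improved (board : List String) (index : Int) (transposition_table : List (List String × List (List String))) : List (List String) :=
  match (PySem.Dict.mk transposition_table).get? board with
  | some v => v
  | none =>
    let st := (PySem.List.enumerate board 0).foldl
      (fun (st : Int × List (List String)) ip =>
        if ip.2 == "B" then
          if !check_for_mills ip.1 board then
            (st.1 + 1, st.2 ++ [PySem.List.pySetD board ip.1 "x"])
          else st
        else st) (0, [])
    if st.1 == 0 then st.2 ++ [board] else st.2

-- ===== PORT B =====

def MILLS : List (Int × Int × Int) := [
  (0, 2, 4), (1, 3, 5), (1, 8, 17), (3, 7, 14), (5, 6, 11), (6, 7, 8),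
  (9, 10, 11), (9, 12, 15), (10, 13, 16), (11, 14, 17), (12, 13, 14),
  (15, 16, 17)]

-- pass 1 of B: the set of cells protected by a completed mill; mills that do not fit on the board
-- are skipped by the bounds test, as in Source B
def protected_cells (board : List String) : PySem.Set Int :=
  MILLS.foldl (fun s m =>
    if decide (m.2.2 < (board.length : Int)) &&
       (PySem.List.pyGetD board m.1 "" == PySem.List.pyGetD board m.2.1 "") &&
       (PySem.List.pyGetD board m.2.1 "" == PySem.List.pyGetD board m.2.2 "") then
      PySem.Set.update s [m.1, m.2.1, m.2.2]
    else s) PySem.Set.empty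

def generate_remove_improved_alt (board : List String) (index : Int) (transposition_table : List (List String × List (List String))) : List (List String) :=
  match (PySem.Dict.mk transposition_table).get? board with
  | some cached => cached
  | none =>
    let prot := protected_cells board
    let new_boards := (PySem.List.pyRange 0 (board.length : Int) 1).foldl
      (fun (acc : List (List String)) i =>
        if (PySem.List.pyGetD board i "" == "B") && !(PySem.Set.contains prot i) then
          acc ++ [PySem.List.pySetD board i "x"]
        else acc) []
    if new_boards.isEmpty then [board] else new_boards

-- ===== PRECONDITION & SPEC =====
-- Pre_ excludes uncached boards shorter than 18 cells that contain 'B': on those A's eagerly built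
-- mill dict indexes past the end and raises IndexError on all but some 17-cell boards, where
-- and-short-circuiting happens to avoid the bad access (there A returns and agrees with B, but
-- whether A raises depends on the piece values, so the whole shape is excluded).
def Pre_generate_remove_improved (board : List String) (index : Int) (transposition_table : List (List String × List (List String))) : Prop :=
  (PySem.Dict.mk transposition_table).get? board ≠ none ∨ "B" ∉ board ∨ 18 ≤ board.length
instance (board : List String) (index : Int) (transposition_table : List (List String × List (List String))) : Decidable (Pre_generate_remove_improved board index transposition_table) := by unfold Pre_generate_remove_improved; infer_instance

def pvWitness_generate_remove_improved : List String × Int × (List (List String × List (List String))) :=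
  (["B", "W", "x", "B", "B", "x", "W", "x", "x", "B", "x", "x", "W", "x", "x", "x", "B", "x"], 0, [])

def Spec_generate_remove_improved (board : List String) (index : Int) (transposition_table : List (List String × List (List String))) (out : List (List String)) : Prop := out = generate_remove_improved_alt board index transposition_table
instance (board : List String) (index : Int) (transposition_table : List (List String × List (List String))) (out : List (List String)) : Decidable (Spec_generate_remove_improved board index transposition_table out) := by unfold Spec_generate_remove_improved; infer_instance

-- ===== CLAIM (what is proved, stated in full; the proofs are below) =====
def Claim_equal_generate_remove_improved : Prop := ∀ (board : List String) (index : Int) (transposition_table : List (List String × List (List String))), Dom_generate_remove_improved board index transposition_table → Pre_generate_remove_improved board index transposition_table → Spec_generate_remove_improved board index transposition_table (generate_remove_improved board index transposition_table)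

-- ===== LEMMAS AND PROOFS =====

-- membership in B's folded protected set, characterised over an arbitrary mill list
lemma mem_fold_prot (board : List String) (ms : List (Int × Int × Int)) (s : PySem.Set Int) (i : Int) :
    i ∈ ms.foldl (fun s m =>
      if decide (m.2.2 < (board.length : Int)) &&
         (PySem.List.pyGetD board m.1 "" == PySem.List.pyGetD board m.2.1 "") &&
         (PySem.List.pyGetD board m.2.1 "" == PySem.List.pyGetD board m.2.2 "") then
        PySem.Set.update s [m.1, m.2.1, m.2.2]
      else s) s
    ↔ i ∈ s ∨ ∃ m ∈ ms,
        (decide (m.2.2 < (board.length : Int)) &&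
         (PySem.List.pyGetD board m.1 "" == PySem.List.pyGetD board m.2.1 "") &&
         (PySem.List.pyGetD board m.2.1 "" == PySem.List.pyGetD board m.2.2 "")) = true ∧
        (i = m.1 ∨ i = m.2.1 ∨ i = m.2.2) := by
  induction ms generalizing s with
  | nil => simp
  | cons m ms ih =>
    by_cases hc : (decide (m.2.2 < (board.length : Int)) &&
         (PySem.List.pyGetD board m.1 "" == PySem.List.pyGetD board m.2.1 "") &&
         (PySem.List.pyGetD board m.2.1 "" == PySem.List.pyGetD board m.2.2 "")) = true
    · simp only [List.foldl_cons, if_pos hc, ih, PySem.Set.mem_update, List.mem_cons,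
        List.not_mem_nil, or_false, exists_eq_or_imp]
      simp [hc]
      exact or_assoc
    · simp only [List.foldl_cons, if_neg hc, ih, List.exists_mem_cons_iff]
      simp [hc]

-- two orientations of "both other cells equal cell i" vs the chained comparison of Source B
lemma eqA (x y z : String) : (y = x ∧ z = x) ↔ (x = y ∧ y = z) := by
  constructor <;> rintro ⟨rfl, rfl⟩ <;> exact ⟨rfl, rfl⟩
lemma eqC (x y z : String) : (x = z ∧ y = z) ↔ (x = y ∧ y = z) := by
  constructor <;> rintro ⟨rfl, rfl⟩ <;> exact ⟨rfl, rfl⟩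

-- A's hard-coded per-index mill dict agrees with membership in B's protected set (18-cell boards)
set_option maxHeartbeats 1600000 in
lemma mills_agree (board : List String) (h18 : 18 ≤ board.length) (i : Int) (h0 : 0 ≤ i) :
    check_for_mills i board = PySem.Set.contains (protected_cells board) i := by
  have hlen : (18 : Int) ≤ (board.length : Int) := by exact_mod_cast h18
  rw [Bool.eq_iff_iff, PySem.Set.contains_iff]
  unfold protected_cells
  rw [mem_fold_prot]
  have h4 : (4 : Int) < (board.length : Int) := by omega
  have h5 : (5 : Int) < (board.length : Int) := by omega
  have h8 : (8 : Int) < (board.length : Int) := by omega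
  have h11 : (11 : Int) < (board.length : Int) := by omega
  have h14 : (14 : Int) < (board.length : Int) := by omega
  have h15 : (15 : Int) < (board.length : Int) := by omega
  have h16 : (16 : Int) < (board.length : Int) := by omega
  have h17 : (17 : Int) < (board.length : Int) := by omega
  rcases lt_or_ge i 18 with hi | hi
  · interval_cases i <;>
      simp [check_for_mills, pvG, PySem.Dict.getD, PySem.Dict.get?, MILLS,
        h4, h5, h8, h11, h14, h15, h16, h17, eqA, eqC] <;>
      first
        | tauto
        | aesop
  · have hk : ∀ k : Int, k < 18 → (k == i) = false := by intro k hk; simp; omega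
    simp [check_for_mills, pvG, PySem.Dict.getD, PySem.Dict.get?, MILLS,
      hk 0 (by norm_num), hk 1 (by norm_num), hk 2 (by norm_num), hk 3 (by norm_num),
      hk 4 (by norm_num), hk 5 (by norm_num), hk 6 (by norm_num), hk 7 (by norm_num),
      hk 8 (by norm_num), hk 9 (by norm_num), hk 10 (by norm_num), hk 11 (by norm_num),
      hk 12 (by norm_num), hk 13 (by norm_num), hk 14 (by norm_num), hk 15 (by norm_num),
      hk 16 (by norm_num), hk 17 (by norm_num)]
    omega

-- A's per-entry selector over the enumerated board
def selA (board : List String) : (Int × String) → Option (List String) :=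
  fun ip =>
    if ip.2 == "B" && !check_for_mills ip.1 board then
      some (PySem.List.pySetD board ip.1 "x")
    else none

-- A's counting loop computes the filterMap of selA together with its length
lemma loopA (board : List String) (xs : List (Int × String)) (c : Int) (acc : List (List String)) :
    xs.foldl
      (fun (st : Int × List (List String)) ip =>
        if ip.2 == "B" then
          if !check_for_mills ip.1 board then
            (st.1 + 1, st.2 ++ [PySem.List.pySetD board ip.1 "x"])
          else st
        else st) (c, acc)
      = (c + ((xs.filterMap (selA board)).length : Int), acc ++ xs.filterMap (selA board)) := by
  induction xs generalizing c acc with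
  | nil => simp
  | cons x xs ih =>
    rw [List.foldl_cons]
    by_cases hB : (x.2 == "B") = true
    · by_cases hm : check_for_mills x.1 board = true
      · have hs : selA board x = none := by simp [selA, hm]
        simp only [hB, if_true, hm, Bool.not_true, Bool.false_eq_true, if_false,
          List.filterMap_cons, hs]
        exact ih c acc
      · have hmf : check_for_mills x.1 board = false := by simpa using hm
        have hs : selA board x = some (PySem.List.pySetD board x.1 "x") := by
          simp [selA, hB, hmf]
        simp only [hB, if_true, hmf, Bool.not_false, List.filterMap_cons, hs]
        rw [ih (c + 1) (acc ++ [PySem.List.pySetD board x.1 "x"])]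
        refine Prod.ext ?_ ?_
        · simp; ring
        · simp
    · have hBf : (x.2 == "B") = false := by simpa using hB
      have hs : selA board x = none := by simp [selA, hBf]
      simp only [hBf, Bool.false_eq_true, if_false, List.filterMap_cons, hs]
      exact ih c acc

-- B's append loop computes the same filterMap, given pointwise agreement of the tests
lemma loopB (board : List String) (prot : PySem.Set Int) (xs : List (Int × String))
    (acc : List (List String))
    (h : ∀ ip ∈ xs, ((PySem.List.pyGetD board ip.1 "" == "B") && !(PySem.Set.contains prot ip.1))
          = ((ip.2 == "B") && !check_for_mills ip.1 board)) :
    xs.foldl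
      (fun (acc : List (List String)) ip =>
        if (PySem.List.pyGetD board ip.1 "" == "B") && !(PySem.Set.contains prot ip.1) then
          acc ++ [PySem.List.pySetD board ip.1 "x"]
        else acc) acc
      = acc ++ xs.filterMap (selA board) := by
  induction xs generalizing acc with
  | nil => simp
  | cons x xs ih =>
    rw [List.foldl_cons, h x List.mem_cons_self]
    have hrest : ∀ ip ∈ xs, ((PySem.List.pyGetD board ip.1 "" == "B") && !(PySem.Set.contains prot ip.1))
          = ((ip.2 == "B") && !check_for_mills ip.1 board) :=
      fun ip hip => h ip (List.mem_cons_of_mem _ hip)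
    by_cases hx : ((x.2 == "B") && !check_for_mills x.1 board) = true
    · have hs : selA board x = some (PySem.List.pySetD board x.1 "x") := by simp [selA, hx]
      rw [if_pos hx, ih _ hrest]
      simp [hs]
    · have hxf : ((x.2 == "B") && !check_for_mills x.1 board) = false := by simpa using hx
      have hs : selA board x = none := by simp [selA, hxf]
      rw [if_neg (by simp [hxf]), ih _ hrest]
      simp [hs]

lemma main_eq (board : List String) (index : Int)
    (tt : List (List String × List (List String)))
    (hpre : Pre_generate_remove_improved board index tt) :
    generate_remove_improved board index tt = generate_remove_improved_alt board index tt := by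
  unfold generate_remove_improved generate_remove_improved_alt
  cases hg : (PySem.Dict.mk tt).get? board with
  | some v => rfl
  | none =>
    simp only []
    have hpre' : "B" ∉ board ∨ 18 ≤ board.length := by
      rcases hpre with h | h | h
      · exact absurd hg h
      · exact Or.inl h
      · exact Or.inr h
    have hpt : ∀ ip ∈ PySem.List.enumerate board 0,
        ((PySem.List.pyGetD board ip.1 "" == "B") && !(PySem.Set.contains (protected_cells board) ip.1))
          = ((ip.2 == "B") && !check_for_mills ip.1 board) := by
      intro ip hip
      obtain ⟨k, hk, rfl⟩ := (PySem.List.mem_enumerate_iff _ _ _).1 hip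
      simp only [zero_add]
      have hget : PySem.List.pyGetD board (k : Int) "" = board[k] := by
        rw [PySem.List.pyGetD_natCast]
        exact List.getD_eq_getElem board "" hk
      rw [hget]
      by_cases hB : (board[k] == "B") = true
      · rcases hpre' with h | h
        · exact absurd (beq_iff_eq.1 hB ▸ List.getElem_mem hk) h
        · rw [mills_agree board h (k : Int) (by positivity)]
      · have hBf : (board[k] == "B") = false := by simpa using hB
        simp [hBf]
    have hrange : PySem.List.pyRange 0 (board.length : Int) 1
        = (PySem.List.enumerate board 0).map (·.1) := by
      rw [PySem.List.map_fst_enumerate]; norm_num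
    rw [hrange, List.foldl_map, loopA, loopB board _ _ [] hpt]
    cases hL : (PySem.List.enumerate board 0).filterMap (selA board) with
    | nil => simp
    | cons y ys =>
      have h1 : ((0 : Int) + (((y :: ys).length : Nat) : Int) == 0) = false := by
        simp
        omega
      simp
      omega

-- ===== VERDICT (by name: the statement is the Claim_ definition above) =====
theorem generate_remove_improved_spec : Claim_equal_generate_remove_improved := by
  intro board index tt _ hpre
  unfold Spec_generate_remove_improved
  exact main_eq board index tt hpre
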